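-- pv_equiv track=rewrite | github.com/Spencer-Weston/NBApredict | NBApredict/models/four_factor_regression.py | ensure_unique_index
-- ===== SOURCE A (Python) =====
-- def ensure_unique_index(index, indices, i=1):  # Indexed to 1 so +1 == 2nd, 3rd, 4th, etc. game
--     """Check if index is in indices, modify index until it's unique, and return the unique index
--
--     If the index is unique, it's returned as is. Otherwise, the function calls itself and increments i. The recursion
--     stops when the index and numerical suffix (i) are not in indices. Used to create unique identifiers for multiple
--     matchups between the same teams.
--
--     Args:
--         index: A string index to check for in indices
--         indices: A list of indices to check the index against
--         i: A numerical suffix used to modify index until it does not exist in indices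
--     Returns:
--         index, or a modified form of index, that does not exist in indices
--     """
--     if index in indices:
--         i = i+1
--         test_index = "{}{}".format(index, i)
--         if test_index in indices:
--             return ensure_unique_index(index, indices, i)
--         else:
--             return test_index
--     else:
--         return index
-- ===== SOURCE B (Python) =====
-- def ensure_unique_index(index, indices, i=1):
--     """Collect the taken suffixes once, then scan integers for the first free one."""
--     if index not in indices:
--         return index
--     suffixes = {s[len(index):] for s in indices if s.startswith(index)}
--     j = i + 1
--     while str(j) in suffixes:
--         j += 1
--     return "{}{}".format(index, j)
-- ===== Notes on version B (the rewrite author's own statement) =====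
-- stated objective: alternative
-- what changed: Replaces A's self-recursion that rescans the whole list per candidate with one pass collecting the set of suffix strings already taken behind the prefix, followed by an integer loop testing suffix membership in that set.
import Mathlib
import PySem

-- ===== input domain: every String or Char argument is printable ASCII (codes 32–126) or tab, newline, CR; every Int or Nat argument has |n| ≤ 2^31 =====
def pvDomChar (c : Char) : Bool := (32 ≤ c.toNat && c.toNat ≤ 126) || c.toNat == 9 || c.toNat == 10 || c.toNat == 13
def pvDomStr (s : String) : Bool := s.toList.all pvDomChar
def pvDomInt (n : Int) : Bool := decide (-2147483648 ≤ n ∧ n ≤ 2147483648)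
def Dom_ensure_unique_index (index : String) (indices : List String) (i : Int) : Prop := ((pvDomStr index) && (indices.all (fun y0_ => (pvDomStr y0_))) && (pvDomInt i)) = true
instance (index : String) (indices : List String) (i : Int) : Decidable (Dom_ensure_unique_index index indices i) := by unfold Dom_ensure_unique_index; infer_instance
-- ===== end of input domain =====

-- B replaces A's per-step linear scans of `indices` by one pass that collects the set of
-- suffix strings already taken behind `index`, then scans integers for the first free one
-- (alternative decomposition; same asymptotic cost on these list sizes).

-- ===== PORT A =====
-- A's recursion terminates because the candidates index++str(j) are pairwise distinct,
-- so at most indices.length of them can be members; fuel indices.length+1 is always enough.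
def pvARec (fuel : Nat) (index : String) (indices : List String) (i : Int) : String :=
  match fuel with
  | 0 => index  -- unreachable with the fuel supplied below
  | fuel + 1 =>
    if indices.contains index then
      let i' := i + 1
      let test_index := index ++ PySem.Int.toStr i'
      if indices.contains test_index then pvARec fuel index indices i'
      else test_index
    else index

def ensure_unique_index (index : String) (indices : List String) (i : Int) : String :=
  pvARec (indices.length + 1) index indices i

-- ===== PORT B =====
-- the set comprehension {s[len(index):] for s in indices if s.startswith(index)},
-- with string contents handled on the code-point (List Char) side, which is exact
def pvSuffixes (index : String) (indices : List String) : PySem.Set (List Char) :=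
  PySem.Set.ofList (indices.filterMap fun s =>
    if PySem.Chars.startswith s.toList index.toList then
      some (PySem.List.slice s.toList (some (index.toList.length : Int)) none)
    else none)

-- the `while str(j) in suffixes: j += 1` loop; none = fuel exhausted (unreachable below)
def pvFindFree (fuel : Nat) (suffs : PySem.Set (List Char)) (j : Int) : Option Int :=
  match fuel with
  | 0 => none
  | fuel + 1 =>
    if PySem.Set.contains suffs (PySem.Int.toChars j) then pvFindFree fuel suffs (j + 1)
    else some j

def ensure_unique_index_alt (index : String) (indices : List String) (i : Int) : String :=
  if !(indices.contains index) then index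
  else
    match pvFindFree (indices.length + 1) (pvSuffixes index indices) (i + 1) with
    | none => index  -- unreachable with the fuel supplied
    | some j => index ++ PySem.Int.toStr j

-- ===== PRECONDITION & SPEC =====
def Spec_ensure_unique_index (index : String) (indices : List String) (i : Int) (out : String) : Prop := out = ensure_unique_index_alt index indices i
instance (index : String) (indices : List String) (i : Int) (out : String) : Decidable (Spec_ensure_unique_index index indices i out) := by unfold Spec_ensure_unique_index; infer_instance

-- ===== CLAIM (what is proved, stated in full; the proofs are below) =====
def Claim_equal_ensure_unique_index : Prop := ∀ (index : String) (indices : List String) (i : Int), Dom_ensure_unique_index index indices i → Spec_ensure_unique_index index indices i (ensure_unique_index index indices i)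

-- ===== LEMMAS AND PROOFS =====

-- membership of a concatenation in `indices` is membership of its tail in the suffix set
theorem pv_contains_append (index t : String) (indices : List String) :
    indices.contains (index ++ t) = PySem.Set.contains (pvSuffixes index indices) t.toList := by
  rw [Bool.eq_iff_iff]
  simp only [pvSuffixes, PySem.Set.contains, List.contains_iff_mem, PySem.Set.mem_ofList,
    List.mem_filterMap, Option.ite_none_right_eq_some, Option.some.injEq]
  constructor
  · intro hm
    refine ⟨index ++ t, hm, ?_, ?_⟩
    · rw [PySem.Chars.startswith_iff, String.toList_append]
      exact List.prefix_append _ _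
    · rw [PySem.List.slice_from_natCast, String.toList_append, List.drop_left]
  · rintro ⟨s, hs, hpre, hdrop⟩
    rw [PySem.Chars.startswith_iff] at hpre
    obtain ⟨u, hu⟩ := hpre
    rw [PySem.List.slice_from_natCast, ← hu, List.drop_left] at hdrop
    have : s = index ++ t := by
      apply String.toList_inj.mp
      rw [String.toList_append, ← hu, hdrop]
    rwa [this] at hs

theorem pv_loops_eq (fuel : Nat) (index : String) (indices : List String) (i : Int)
    (h : indices.contains index = true) :
    pvARec fuel index indices i =
      (match pvFindFree fuel (pvSuffixes index indices) (i + 1) with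
       | none => index
       | some j => index ++ PySem.Int.toStr j) := by
  induction fuel generalizing i with
  | zero => rfl
  | succ n ih =>
    simp only [pvARec, pvFindFree, h, if_true]
    have hc : indices.contains (index ++ PySem.Int.toStr (i + 1)) =
        PySem.Set.contains (pvSuffixes index indices) (PySem.Int.toChars (i + 1)) := by
      rw [pv_contains_append, PySem.Int.toList_toStr]
    rw [hc]
    split
    · exact ih _
    · rfl

-- ===== VERDICT (by name: the statement is the Claim_ definition above) =====
theorem ensure_unique_index_spec : Claim_equal_ensure_unique_index := by
  intro index indices i _
  unfold Spec_ensure_unique_index ensure_unique_index ensure_unique_index_alt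
  by_cases h : indices.contains index = true
  · rw [pv_loops_eq _ _ _ _ h]
    have h' : index ∈ indices := by simpa using h
    simp [h']
  · simp at h
    simp [pvARec, h]
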